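-- pv_equiv track=rewrite | github.com/princymittal-cs/typing-speed-test | typing_test.py | show_word_comparison
-- ===== SOURCE A (Python) =====
-- def show_word_comparison(original, typed):
--     original_words = original.split()
--     typed_words = typed.split()
--     comparison = []
--     for i, (o, t) in enumerate(zip(original_words, typed_words)):
--         if o == t:
--             comparison.append(f"[✓] {t}")
--         else:
--             comparison.append(f"[✗] {t} (expected: {o})")
--
--     if len(typed_words) > len(original_words):
--         extra = typed_words[len(original_words):]
--         comparison.extend([f"[✗] {word} (extra)" for word in extra])
--     elif len(original_words) > len(typed_words):
--         missing = original_words[len(typed_words):]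
--         comparison.extend([f"[✗] (missing: {word})" for word in missing])
--
--     return comparison
-- ===== SOURCE B (Python) =====
-- def show_word_comparison(original, typed):
--     def go(ow, tw):
--         if not ow and not tw:
--             return []
--         if not tw:
--             return [f"[✗] (missing: {ow[0]})"] + go(ow[1:], tw)
--         if not ow:
--             return [f"[✗] {tw[0]} (extra)"] + go(ow, tw[1:])
--         o, t = ow[0], tw[0]
--         line = f"[✓] {t}" if o == t else f"[✗] {t} (expected: {o})"
--         return [line] + go(ow[1:], tw[1:])
--     return go(original.split(), typed.split())
-- ===== Notes on version B (the rewrite author's own statement) =====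
-- stated objective: alternative
-- what changed: Replaces A's zip-over-the-common-prefix followed by a length comparison and a slice of the leftover tail with a single recursive merge of the two word lists that handles match, mismatch, extra and missing words in one traversal.
import Mathlib
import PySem

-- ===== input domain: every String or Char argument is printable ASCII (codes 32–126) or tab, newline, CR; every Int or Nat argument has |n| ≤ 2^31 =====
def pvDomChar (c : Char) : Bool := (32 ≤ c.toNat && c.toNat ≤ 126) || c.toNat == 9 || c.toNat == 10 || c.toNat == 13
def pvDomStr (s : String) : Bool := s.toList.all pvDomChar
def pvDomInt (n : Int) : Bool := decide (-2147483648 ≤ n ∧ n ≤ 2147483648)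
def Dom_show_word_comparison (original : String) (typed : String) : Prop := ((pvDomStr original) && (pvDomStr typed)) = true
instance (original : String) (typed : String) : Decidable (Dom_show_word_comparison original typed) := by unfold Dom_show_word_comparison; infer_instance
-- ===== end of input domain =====

-- ===== PORT A =====
def show_word_comparison (original : String) (typed : String) : List String :=
  let original_words := PySem.Str.split₀ original
  let typed_words := PySem.Str.split₀ typed
  let comparison := (original_words.zip typed_words).foldl
    (fun acc ot =>
      acc ++ [if ot.1 == ot.2 then "[✓] " ++ ot.2
              else "[✗] " ++ ot.2 ++ " (expected: " ++ ot.1 ++ ")"]) []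
  if typed_words.length > original_words.length then
    comparison ++ (PySem.List.slice typed_words (some (original_words.length : Int)) none).map
      (fun word => "[✗] " ++ word ++ " (extra)")
  else if original_words.length > typed_words.length then
    comparison ++ (PySem.List.slice original_words (some (typed_words.length : Int)) none).map
      (fun word => "[✗] (missing: " ++ word ++ ")")
  else comparison

-- ===== PORT B =====
-- single recursive merge of the two word lists (B's inner 'go')
def swcGo : List String → List String → List String
  | [], [] => []
  | o :: os, [] => ("[✗] (missing: " ++ o ++ ")") :: swcGo os []
  | [], t :: ts => ("[✗] " ++ t ++ " (extra)") :: swcGo [] ts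
  | o :: os, t :: ts =>
      (if o == t then "[✓] " ++ t else "[✗] " ++ t ++ " (expected: " ++ o ++ ")") :: swcGo os ts

def show_word_comparison_alt (original : String) (typed : String) : List String :=
  swcGo (PySem.Str.split₀ original) (PySem.Str.split₀ typed)

-- ===== PRECONDITION & SPEC =====
def Spec_show_word_comparison (original : String) (typed : String) (out : List String) : Prop := out = show_word_comparison_alt original typed
instance (original : String) (typed : String) (out : List String) : Decidable (Spec_show_word_comparison original typed out) := by unfold Spec_show_word_comparison; infer_instance

-- ===== CLAIM (what is proved, stated in full; the proofs are below) =====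
def Claim_equal_show_word_comparison : Prop := ∀ (original : String) (typed : String), Dom_show_word_comparison original typed → Spec_show_word_comparison original typed (show_word_comparison original typed)

-- ===== LEMMAS AND PROOFS =====

-- ===== VERDICT (by name: the statement is the Claim_ definition above) =====
lemma swc_foldl_map (f : String × String → String) :
    ∀ (l : List (String × String)) (init : List String),
      l.foldl (fun acc ot => acc ++ [f ot]) init = init ++ l.map f := by
  intro l
  induction l with
  | nil => simp
  | cons p ps ih => intro init; simp [List.foldl, ih]

lemma swcGo_nil_right : ∀ ow : List String,
    swcGo ow [] = ow.map (fun w => "[✗] (missing: " ++ w ++ ")") := by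
  intro ow; induction ow with
  | nil => simp [swcGo]
  | cons o os ih => simp [swcGo, ih]

lemma swcGo_nil_left : ∀ tw : List String,
    swcGo [] tw = tw.map (fun w => "[✗] " ++ w ++ " (extra)") := by
  intro tw; induction tw with
  | nil => simp [swcGo]
  | cons t ts ih => simp [swcGo, ih]

lemma swc_key : ∀ (ow tw : List String),
    (let cmp := (ow.zip tw).map (fun ot => if ot.1 == ot.2 then "[✓] " ++ ot.2
        else "[✗] " ++ ot.2 ++ " (expected: " ++ ot.1 ++ ")")
     if tw.length > ow.length then
        cmp ++ (tw.drop ow.length).map (fun w => "[✗] " ++ w ++ " (extra)")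
      else if ow.length > tw.length then
        cmp ++ (ow.drop tw.length).map (fun w => "[✗] (missing: " ++ w ++ ")")
      else cmp) = swcGo ow tw := by
  intro ow
  induction ow with
  | nil =>
    intro tw
    cases tw with
    | nil => simp [swcGo]
    | cons t ts => simp [swcGo_nil_left]
  | cons o os ih =>
    intro tw
    cases tw with
    | nil => simp [swcGo_nil_right]
    | cons t ts =>
      have := ih ts
      simp only [List.zip_cons_cons, List.map_cons, List.length_cons, List.drop_succ_cons,
        swcGo, Nat.add_lt_add_iff_right]
      split_ifs at this ⊢ with h1 h2 <;> simp_all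

theorem show_word_comparison_spec : Claim_equal_show_word_comparison := by
  intro original typed _
  unfold Spec_show_word_comparison show_word_comparison show_word_comparison_alt
  simp only [swc_foldl_map, List.nil_append, PySem.List.slice_from_natCast]
  exact swc_key _ _
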